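-- pv_equiv track=rewrite | github.com/Programmers-Study-2024/algorithm-study | week7/p12938_python_yeongeun.py | solution
-- ===== SOURCE A (Python) =====
-- def solution(n, s):
--     answer = []
--     if s-n < 0:
--         return [-1]
--
--     num = s//n
--     rest = s%n
--
--     for _ in range(n):
--         answer.append(num) # 몫을 n만큼 넣어주기
--     if rest != 0: # 나누어 떨어지지 않으면
--         for a in range(len(answer)):
--             answer[a] += 1 # 1씩 분배해서 추가해주기
--             rest -= 1
--             if rest == 0:
--                 break
--     answer.sort()
--
--     return answer
-- ===== SOURCE B (Python) =====
-- def solution(n, s):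
--     if s < n:
--         return [-1]
--     return [(s + i) // n for i in range(n)]
-- ===== Notes on version B (the rewrite author's own statement) =====
-- stated objective: alternative
-- what changed: B computes each entry of the sorted answer by the closed form (s+i)//n in a single comprehension over range(n), replacing A's append loop, increment-and-break distribution loop and final sort.
-- outside the precondition, e.g. on solution(0, 5): A raises ZeroDivisionError, B returns []
import Mathlib
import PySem

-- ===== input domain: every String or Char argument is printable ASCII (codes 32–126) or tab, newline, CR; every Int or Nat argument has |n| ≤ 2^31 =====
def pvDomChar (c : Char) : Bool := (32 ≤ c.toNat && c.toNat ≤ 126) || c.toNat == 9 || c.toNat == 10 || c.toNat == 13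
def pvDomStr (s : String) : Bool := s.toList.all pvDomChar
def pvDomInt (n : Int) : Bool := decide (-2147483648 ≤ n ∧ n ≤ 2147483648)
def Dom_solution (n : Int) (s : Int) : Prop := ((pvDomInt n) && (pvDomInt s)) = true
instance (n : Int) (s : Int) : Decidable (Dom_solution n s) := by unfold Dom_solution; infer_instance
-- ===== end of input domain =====

-- B computes each entry of the sorted answer directly by the closed form (s+i)//n,
-- replacing A's build / distribute-with-break / sort passes by one indexed pass (no sort).

-- ===== PORT A =====
-- the `for a in range(len(answer)): answer[a] += 1; rest -= 1; if rest == 0: break` loop: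
-- returns the final (answer, rest) pair
def solDistLoop (ans : List Int) (rest : Int) (idxs : List Int) : List Int × Int :=
  match idxs with
  | [] => (ans, rest)
  | a :: t =>
    let ans' := ans.modify a.toNat (· + 1)   -- answer[a] += 1 (a is a valid nonnegative index from range(len(answer)))
    let rest' := rest - 1
    if rest' = 0 then (ans', rest') else solDistLoop ans' rest' t

def solution (n : Int) (s : Int) : List Int :=
  if s - n < 0 then [-1]
  else
    let num := PySem.Int.floordiv s n
    let rest := PySem.Int.mod s n
    let answer := (PySem.List.pyRange 0 n 1).foldl (fun acc _ => acc ++ [num]) []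
    let answer :=
      if rest ≠ 0 then
        (solDistLoop answer rest (PySem.List.pyRange 0 (PySem.List.len answer) 1)).1
      else answer
    PySem.List.sorted answer (fun x => x) false

-- ===== PORT B =====
def solution_alt (n : Int) (s : Int) : List Int :=
  if s < n then [-1]
  else (PySem.List.pyRange 0 n 1).map (fun i => PySem.Int.floordiv (s + i) n)

-- ===== PRECONDITION & SPEC =====
-- Pre_ excludes exactly n = 0 with 0 ≤ s, where the Python A raises ZeroDivisionError.
def Pre_solution (n : Int) (s : Int) : Prop := ¬ (n = 0 ∧ 0 ≤ s)
instance (n : Int) (s : Int) : Decidable (Pre_solution n s) := by unfold Pre_solution; infer_instance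
def pvWitness_solution : Int × Int := (3, 11)

def Spec_solution (n : Int) (s : Int) (out : List Int) : Prop := out = solution_alt n s
instance (n : Int) (s : Int) (out : List Int) : Decidable (Spec_solution n s out) := by unfold Spec_solution; infer_instance

-- ===== CLAIM (what is proved, stated in full; the proofs are below) =====
def Claim_equal_solution : Prop := ∀ (n : Int) (s : Int), Dom_solution n s → Pre_solution n s → Spec_solution n s (solution n s)

-- ===== LEMMAS AND PROOFS =====

lemma modify_append_cons (pre t : List Int) (x : Int) :
    (pre ++ x :: t).modify pre.length (· + 1) = pre ++ (x + 1) :: t := by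
  induction pre with
  | nil => simp [List.modify]
  | cons h tl ih => simpa [List.modify] using ih

-- characterization of the distribution loop on pre ++ suf with index list [|pre|, …, |pre|+|suf|-1]
lemma solDistLoop_spec (suf : List Int) : ∀ (pre : List Int) (r : Nat), 0 < r → r ≤ suf.length →
    solDistLoop (pre ++ suf) (r : Int)
      (PySem.List.pyRange (pre.length : Int) ((pre.length : Int) + (suf.length : Int)) 1) =
    (pre ++ (suf.take r).map (· + 1) ++ suf.drop r, 0) := by
  induction suf with
  | nil => intro pre r hr hle; simp only [List.length_nil] at hle; omega
  | cons x t ih =>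
    intro pre r hr hle
    have hlt : (pre.length : Int) < (pre.length : Int) + ((x :: t).length : Int) := by
      simp
    rw [PySem.List.pyRange_one_cons hlt]
    simp only [solDistLoop]
    have hmod : (pre ++ x :: t).modify ((pre.length : Int)).toNat (· + 1) = pre ++ (x + 1) :: t := by
      simpa using modify_append_cons pre t x
    rw [hmod]
    by_cases h1 : (r : Int) - 1 = 0
    · have : r = 1 := by omega
      subst this
      simp [List.append_assoc]
    · have hr1 : 1 < r := by omega
      simp only [if_neg h1]
      have := ih (pre ++ [x + 1]) (r - 1) (by omega) (by simp at hle ⊢; omega)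
      have hcast : ((r - 1 : Nat) : Int) = (r : Int) - 1 := by omega
      rw [hcast] at this
      have harg : ((pre ++ [x + 1]).length : Int) = (pre.length : Int) + 1 := by simp
      rw [harg] at this
      have harg2 : (pre.length : Int) + 1 + (t.length : Int) = (pre.length : Int) + ((x :: t).length : Int) := by
        simp; omega
      rw [harg2] at this
      rw [show pre ++ (x + 1) :: t = (pre ++ [x + 1]) ++ t by simp, this]
      rcases r with _ | r'
      · omega
      · simp [List.take_succ_cons, List.drop_succ_cons]

lemma pairwise_replicate_append (a b : Int) (p q : Nat) (h : a ≤ b) :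
    List.Pairwise (· ≤ ·) (List.replicate p a ++ List.replicate q b) := by
  rw [List.pairwise_append]
  refine ⟨List.pairwise_replicate.2 (Or.inr le_rfl), List.pairwise_replicate.2 (Or.inr le_rfl), ?_⟩
  simp_all

lemma sorted_two_blocks (num : Int) (p q : Nat) :
    PySem.List.sorted (List.replicate p (num + 1) ++ List.replicate q num) (fun x => x) false =
      List.replicate q num ++ List.replicate p (num + 1) := by
  apply PySem.List.sorted_id_eq_of_perm_of_pairwise
  · exact List.perm_append_comm
  · exact pairwise_replicate_append num (num + 1) q p (by omega)

-- B's closed form equals the two constant blocks (the sorted answer)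
lemma alt_eq_blocks (n s : Int) (hn : 0 < n) (hsn : n ≤ s) :
    solution_alt n s =
      List.replicate (n - PySem.Int.mod s n).toNat (PySem.Int.floordiv s n) ++
      List.replicate (PySem.Int.mod s n).toNat (PySem.Int.floordiv s n + 1) := by
  unfold solution_alt
  rw [if_neg (by omega)]
  set q := PySem.Int.floordiv s n with hq
  set r := PySem.Int.mod s n with hr
  have hqr : q * n + r = s := PySem.Int.floordiv_mul_add_mod s n
  have hr0 : 0 ≤ r := PySem.Int.mod_nonneg s hn
  have hrn : r < n := PySem.Int.mod_lt s hn
  have hq1 : (q + 1) * n = q * n + n := by ring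
  have hq2 : (q + 2) * n = q * n + n + n := by ring
  apply List.ext_getElem
  · simp [PySem.List.length_pyRange_one]; omega
  · intro i hi hi2
    rw [List.getElem_map, PySem.List.getElem_pyRange_one]
    have hib : i < (n - 0).toNat := by
      simpa [PySem.List.length_pyRange_one] using hi
    by_cases hcase : i < (n - r).toNat
    · rw [List.getElem_append_left (by simpa using hcase)]
      simp only [List.getElem_replicate]
      rw [PySem.Int.floordiv_eq_iff_of_pos hn]
      constructor
      · omega
      · rw [hq1]; omega
    · rw [List.getElem_append_right (by simpa using hcase)]
      simp only [List.getElem_replicate]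
      rw [PySem.Int.floordiv_eq_iff_of_pos hn]
      constructor
      · rw [hq1]; omega
      · rw [show (q + 1 + 1) * n = q * n + n + n by ring]; omega

-- ===== VERDICT (by name: the statement is the Claim_ definition above) =====
theorem solution_spec : Claim_equal_solution := by
  intro n s _ hpre
  unfold Spec_solution solution
  have hiff : s - n < 0 ↔ s < n := by omega
  by_cases hlt : s < n
  · unfold solution_alt; simp [hiff, hlt]
  · simp only [hiff, if_neg hlt]
    have hsn : n ≤ s := by omega
    set num := PySem.Int.floordiv s n with hnum
    set rest := PySem.Int.mod s n with hrest
    rcases lt_trichotomy n 0 with hn | hn | hn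
    · -- n < 0 : range(n) is empty on both sides
      obtain ⟨hb1, hb2⟩ := PySem.Int.mod_neg_bounds s hn
      rw [PySem.List.pyRange_one_eq_nil (le_of_lt hn)]
      unfold solution_alt
      rw [if_neg hlt, PySem.List.pyRange_one_eq_nil (le_of_lt hn)]
      by_cases hr : rest = 0
      · simp [hr, PySem.List.sorted]
      · simp [hr, PySem.List.len, solDistLoop, PySem.List.pyRange, PySem.List.sorted]
    · exact absurd ⟨hn, by omega⟩ hpre
    · -- n > 0
      have hm0 : 0 ≤ rest := PySem.Int.mod_nonneg s hn
      have hmlt : rest < n := PySem.Int.mod_lt s hn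
      rw [alt_eq_blocks n s hn hsn, ← hnum, ← hrest]
      have hfold : (PySem.List.pyRange 0 n 1).foldl (fun acc _ => acc ++ [num]) [] =
          List.replicate n.toNat num := by
        rw [show (fun (acc : List Int) (_ : Int) => acc ++ [num]) =
              (fun acc x => acc ++ [(fun _ => num) x]) from rfl,
            PySem.List.foldl_append_singleton_eq_map]
        simp [PySem.List.length_pyRange_one]
      rw [hfold]
      by_cases hr : rest = 0
      · simp only [hr, ne_eq, not_true_eq_false, if_false]
        rw [PySem.List.sorted_eq_self_of_pairwise]
        · simp
        · exact List.pairwise_replicate.2 (Or.inr (le_refl num))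
      · simp only [hr, ne_eq, not_false_eq_true, if_true]
        have hlen : PySem.List.len (List.replicate n.toNat num) = (n.toNat : Int) := by
          simp [PySem.List.len]
        rw [hlen]
        have hspec := solDistLoop_spec (List.replicate n.toNat num) [] rest.toNat
          (by omega) (by simp; omega)
        have hcast : ((rest.toNat : Nat) : Int) = rest := by omega
        rw [hcast] at hspec
        simp only [List.nil_append, List.length_nil, Nat.cast_zero, List.length_replicate, zero_add] at hspec
        rw [hspec]
        have htake : (List.replicate n.toNat num).take rest.toNat =
            List.replicate rest.toNat num := by
          rw [List.take_replicate]; congr 1; omega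
        have hdrop : (List.replicate n.toNat num).drop rest.toNat =
            List.replicate (n.toNat - rest.toNat) num := by
          rw [List.drop_replicate]
        rw [htake, hdrop]
        simp only [List.map_replicate]
        rw [sorted_two_blocks]
        congr 2
        omega
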